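-- pv_equiv track=rewrite | github.com/marionoro/CSCI-1133 | other code/exercise7/ex7d.py | spaceit
-- ===== SOURCE A (Python) =====
-- def spaceit(istr):
--     if len(istr) == 1:
--         return istr
--     else:
--         if istr[0] == istr[1]:
--             return istr[0] + ' ' + spaceit(istr[1:])
--         else:
--             return istr[0] + spaceit(istr[1:])
-- ===== SOURCE B (Python) =====
-- def spaceit(istr):
--     prev = istr[0]
--     result = prev
--     for ch in istr[1:]:
--         if ch == prev:
--             result += ' '
--         result += ch
--         prev = ch
--     return result
-- ===== Notes on version B (the rewrite author's own statement) =====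
-- stated objective: simpler
-- what changed: Replaced A's suffix recursion (which rebuilds O(n) suffix strings by concatenation) by a single forward loop tracking the previous character and appending to an accumulator.
import Mathlib
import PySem

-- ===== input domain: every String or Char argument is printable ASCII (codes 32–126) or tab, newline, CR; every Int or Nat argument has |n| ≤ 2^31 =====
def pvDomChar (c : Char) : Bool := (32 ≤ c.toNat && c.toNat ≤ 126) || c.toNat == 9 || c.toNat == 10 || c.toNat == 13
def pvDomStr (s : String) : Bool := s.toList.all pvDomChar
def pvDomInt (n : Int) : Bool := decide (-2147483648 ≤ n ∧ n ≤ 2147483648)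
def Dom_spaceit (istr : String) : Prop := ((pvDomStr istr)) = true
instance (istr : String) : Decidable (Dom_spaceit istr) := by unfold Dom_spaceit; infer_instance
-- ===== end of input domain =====

-- B replaces A's suffix recursion by one forward loop with a previous-character/accumulator state; a timing run measured B faster.


-- ===== PORT A =====
-- A's suffix recursion over the characters: len==1 returns the string, otherwise
-- istr[0] (+ ' ' if istr[0]==istr[1]) + spaceit(istr[1:]).  The [] case is unreachable
-- under Pre_ (Python raises IndexError there).
def spaceitA : List Char → List Char
  | [] => []
  | [c] => [c]
  | a :: b :: rest =>
    if a == b then a :: ' ' :: spaceitA (b :: rest)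
    else a :: spaceitA (b :: rest)

def spaceit (istr : String) : String := String.mk (spaceitA istr.toList)

-- ===== PORT B =====
-- B: prev = istr[0]; result = prev; for ch in istr[1:]: (space if ch == prev) + ch; prev = ch.
def spaceitBStep (s : Char × List Char) (ch : Char) : Char × List Char :=
  (ch, if ch == s.1 then s.2 ++ [' ', ch] else s.2 ++ [ch])

def spaceit_alt (istr : String) : String :=
  match istr.toList with
  | [] => ""   -- istr[0] raises in Python; outside Pre_
  | c :: rest => String.mk (rest.foldl spaceitBStep (c, [c])).2

-- ===== PRECONDITION & SPEC =====
-- Pre_ excludes only the empty string, where the Python A raises IndexError (istr[0]).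
def Pre_spaceit (istr : String) : Prop := istr ≠ ""
instance (istr : String) : Decidable (Pre_spaceit istr) := by unfold Pre_spaceit; infer_instance
def pvWitness_spaceit : String := "aab"

def Spec_spaceit (istr : String) (out : String) : Prop := out = spaceit_alt istr
instance (istr : String) (out : String) : Decidable (Spec_spaceit istr out) := by unfold Spec_spaceit; infer_instance

-- ===== CLAIM (what is proved, stated in full; the proofs are below) =====
def Claim_equal_spaceit : Prop := ∀ (istr : String), Dom_spaceit istr → Pre_spaceit istr → Spec_spaceit istr (spaceit istr)

-- ===== LEMMAS AND PROOFS =====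

theorem spaceitA_cons_head (b : Char) (r : List Char) :
    spaceitA (b :: r) = b :: (spaceitA (b :: r)).drop 1 := by
  cases r with
  | nil => simp [spaceitA]
  | cons x xs => simp [spaceitA]; split <;> simp

theorem foldl_spaceitB (rest : List Char) (c : Char) (acc : List Char) :
    (rest.foldl spaceitBStep (c, acc)).2 = acc ++ (spaceitA (c :: rest)).drop 1 := by
  induction rest generalizing c acc with
  | nil => simp [spaceitA]
  | cons b r ih =>
    simp only [List.foldl_cons, spaceitBStep]
    rw [ih]
    by_cases h : b = c
    · subst h
      simp [spaceitA]
      rw [spaceitA_cons_head]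
      simp
    · have h1 : (b == c) = false := by simp [h]
      have h2 : (c == b) = false := by exact beq_false_of_ne (Ne.symm h)
      simp [h1, spaceitA, h2]
      rw [spaceitA_cons_head]
      simp

-- ===== VERDICT (by name: the statement is the Claim_ definition above) =====
theorem spaceit_spec : Claim_equal_spaceit := by
  intro istr _ hpre
  unfold Spec_spaceit spaceit spaceit_alt
  cases hl : istr.toList with
  | nil =>
    exact absurd (String.ext (by simp [hl])) hpre
  | cons c rest =>
    simp only
    rw [foldl_spaceitB]
    rw [spaceitA_cons_head c rest]
    simp
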